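-- pv_equiv track=rewrite | github.com/ckoons/BubbleSpacetimeTheory | play/toy_985_spectral_line_verification.py | factorize_7smooth
-- ===== SOURCE A (Python) =====
-- def is_7smooth(n):
--     if n <= 0: return False
--     if n == 1: return True
--     for p in [2, 3, 5, 7]:
--         while n % p == 0:
--             n //= p
--     return n == 1
--
-- def factorize_7smooth(n):
--     if not is_7smooth(n): return None
--     factors = {}
--     for p in [2, 3, 5, 7]:
--         while n % p == 0:
--             factors[p] = factors.get(p, 0) + 1
--             n //= p
--     return factors
-- ===== SOURCE B (Python) =====
-- def factorize_7smooth(n):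
--     # Single pass: divide out each prime while counting, record the exponent once,
--     # and decide 7-smoothness from the final residual (no separate verification scan).
--     if n <= 0:
--         return None
--     factors = {}
--     for p in (2, 3, 5, 7):
--         k = 0
--         while n % p == 0:
--             n //= p
--             k += 1
--         if k:
--             factors[p] = k
--     return factors if n == 1 else None
-- ===== Notes on version B (the rewrite author's own statement) =====
-- stated objective: simpler
-- what changed: Collapsed A's separate is_7smooth verification scan (which divides n down once) plus its recomputing factorization scan into one pass that counts each prime's exponent in a local counter, records it with a single dict assignment, and decides smoothness from the final residual.
import Mathlib
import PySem

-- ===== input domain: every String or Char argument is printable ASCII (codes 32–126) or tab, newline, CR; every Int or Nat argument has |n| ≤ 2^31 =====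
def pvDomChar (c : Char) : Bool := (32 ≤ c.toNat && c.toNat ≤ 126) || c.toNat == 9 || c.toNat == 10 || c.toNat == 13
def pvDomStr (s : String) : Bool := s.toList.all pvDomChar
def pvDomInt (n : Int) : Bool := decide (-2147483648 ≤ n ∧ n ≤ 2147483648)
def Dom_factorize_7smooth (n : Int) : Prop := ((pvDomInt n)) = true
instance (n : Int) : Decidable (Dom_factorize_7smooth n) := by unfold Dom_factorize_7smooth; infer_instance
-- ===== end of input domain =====

-- B merges A's is_7smooth verification pass and its recomputing factorization pass into one
-- count-per-prime pass (objective: simpler).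

-- ===== PORT A =====
-- inner `while n % p == 0: n //= p` of is_7smooth; fuel n.natAbs suffices since each
-- division strictly decreases the (positive) value
def pvStripA (p : Int) : Nat → Int → Int
  | 0, n => n
  | f+1, n =>
      if PySem.Int.mod n p == 0 then pvStripA p f (PySem.Int.floordiv n p) else n

def pvIs7smooth (n : Int) : Bool :=
  if n ≤ 0 then false
  else if n == 1 then true
  else (([2, 3, 5, 7] : List Int).foldl (fun m p => pvStripA p m.natAbs m) n) == 1

-- inner `while` of factorize_7smooth: same divisions, accumulating factors[p]
def pvCountA (p : Int) : Nat → PySem.Dict Int Int × Int → PySem.Dict Int Int × Int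
  | 0, st => st
  | f+1, (d, n) =>
      if PySem.Int.mod n p == 0 then
        pvCountA p f (d.insert p (d.getD p 0 + 1), PySem.Int.floordiv n p)
      else (d, n)

def factorize_7smooth (n : Int) : Option (List (Int × Int)) :=
  if !pvIs7smooth n then none
  else
    some ((([2, 3, 5, 7] : List Int).foldl
      (fun (st : PySem.Dict Int Int × Int) p => pvCountA p st.2.natAbs st)
      (PySem.Dict.empty, n)).1.items)

-- ===== PORT B =====
-- B's inner `while`: divide out p, counting into k
def pvStripCount (p : Int) : Nat → Int → Int → Int × Int
  | 0, n, k => (n, k)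
  | f+1, n, k =>
      if PySem.Int.mod n p == 0 then pvStripCount p f (PySem.Int.floordiv n p) (k + 1)
      else (n, k)

def factorize_7smooth_alt (n : Int) : Option (List (Int × Int)) :=
  if n ≤ 0 then none
  else
    let st := ([2, 3, 5, 7] : List Int).foldl
      (fun (st : PySem.Dict Int Int × Int) p =>
        let r := pvStripCount p st.2.natAbs st.2 0
        (if r.2 ≠ 0 then st.1.insert p r.2 else st.1, r.1))
      (PySem.Dict.empty, n)
    if st.2 == 1 then some st.1.items else none

-- ===== PRECONDITION & SPEC =====
def Spec_factorize_7smooth (n : Int) (out : Option (List (Int × Int))) : Prop := out = factorize_7smooth_alt n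
instance (n : Int) (out : Option (List (Int × Int))) : Decidable (Spec_factorize_7smooth n out) := by unfold Spec_factorize_7smooth; infer_instance

-- ===== CLAIM (what is proved, stated in full; the proofs are below) =====
def Claim_equal_factorize_7smooth : Prop := ∀ (n : Int), Dom_factorize_7smooth n → Spec_factorize_7smooth n (factorize_7smooth n)

-- ===== LEMMAS AND PROOFS =====

-- residual of B's counting loop equals A's stripping loop
lemma stripCount_fst (p : Int) : ∀ (f : Nat) (n k : Int), (pvStripCount p f n k).1 = pvStripA p f n := by
  intro f
  induction f with
  | zero => intro n k; rfl
  | succ f ih =>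
      intro n k
      simp only [pvStripCount, pvStripA]
      split <;> simp [ih]

-- the count accumulator only shifts the result
lemma stripCount_snd_shift (p : Int) : ∀ (f : Nat) (n k : Int), (pvStripCount p f n k).2 = k + (pvStripCount p f n 0).2 := by
  intro f
  induction f with
  | zero => intro n k; simp [pvStripCount]
  | succ f ih =>
      intro n k
      simp only [pvStripCount]
      split
      · rw [ih _ (k + 1), ih _ (0 + 1)]
        ring
      · simp

lemma stripCount_snd_nonneg (p : Int) : ∀ (f : Nat) (n k : Int), 0 ≤ k → 0 ≤ (pvStripCount p f n k).2 := by
  intro f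
  induction f with
  | zero => intro n k hk; simpa [pvStripCount] using hk
  | succ f ih =>
      intro n k hk
      simp only [pvStripCount]
      split
      · exact ih _ _ (by omega)
      · simpa using hk

-- A's per-prime dict update, in B's form, when p is not yet a key
lemma dictstep (d : PySem.Dict Int Int) (p c : Int) (hp : d.getD p 0 = 0) :
    (if c = 0 then d else d.insert p (d.getD p 0 + c)) = (if c ≠ 0 then d.insert p c else d) := by
  rw [hp]
  split_ifs with h h2 <;> simp_all

-- A's counting loop = dict update by B's count, plus A's stripping residual
lemma countA_eq (p : Int) : ∀ (f : Nat) (n : Int) (d : PySem.Dict Int Int),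
    pvCountA p f (d, n) =
      (if (pvStripCount p f n 0).2 = 0 then d else d.insert p (d.getD p 0 + (pvStripCount p f n 0).2),
       pvStripA p f n) := by
  intro f
  induction f with
  | zero => intro n d; simp [pvCountA, pvStripCount, pvStripA]
  | succ f ih =>
      intro n d
      simp only [pvCountA, pvStripCount, pvStripA]
      split
      · rw [ih]
        simp only [zero_add]
        rw [stripCount_snd_shift p f (PySem.Int.floordiv n p) 1]
        have hnn : 0 ≤ (pvStripCount p f (PySem.Int.floordiv n p) 0).2 :=
          stripCount_snd_nonneg p f _ 0 le_rfl
        by_cases hc : (pvStripCount p f (PySem.Int.floordiv n p) 0).2 = 0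
        · simp [hc]
        · have h1 : (1 : Int) + (pvStripCount p f (PySem.Int.floordiv n p) 0).2 ≠ 0 := by omega
          simp only [hc, if_neg h1, PySem.Dict.getD_insert_self,
            PySem.Dict.insert_insert_self]
          ring_nf
          simp
      · simp

theorem factorize_7smooth_spec_aux : ∀ (n : Int), factorize_7smooth n = factorize_7smooth_alt n := by
  intro n
  by_cases h0 : n ≤ 0
  · simp [factorize_7smooth, factorize_7smooth_alt, pvIs7smooth, h0]
  · by_cases h1 : n = 1
    · subst h1; decide
    · have hbe : (n == 1) = false := by simp [h1]
      simp only [factorize_7smooth, factorize_7smooth_alt, pvIs7smooth, if_neg h0, hbe,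
        List.foldl_cons, List.foldl_nil, countA_eq, stripCount_fst, Bool.false_eq_true, if_false]
      generalize hm1 : pvStripA 2 n.natAbs n = m1
      generalize hc1 : (pvStripCount 2 n.natAbs n 0).2 = c1
      generalize hm2 : pvStripA 3 m1.natAbs m1 = m2
      generalize hc2 : (pvStripCount 3 m1.natAbs m1 0).2 = c2
      generalize hm3 : pvStripA 5 m2.natAbs m2 = m3
      generalize hc3 : (pvStripCount 5 m2.natAbs m2 0).2 = c3
      generalize hm4 : pvStripA 7 m3.natAbs m3 = m4
      generalize hc4 : (pvStripCount 7 m3.natAbs m3 0).2 = c4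
      have g2 : (PySem.Dict.empty : PySem.Dict Int Int).getD 2 0 = 0 := by simp
      rw [dictstep _ 2 c1 g2]
      have g3 : (if c1 ≠ 0 then (PySem.Dict.empty : PySem.Dict Int Int).insert 2 c1 else PySem.Dict.empty).getD 3 0 = 0 := by
        split <;> simp [PySem.Dict.getD_insert]
      rw [dictstep _ 3 c2 g3]
      have g5 : ((if c2 ≠ 0 then (if c1 ≠ 0 then (PySem.Dict.empty : PySem.Dict Int Int).insert 2 c1 else PySem.Dict.empty).insert 3 c2 else (if c1 ≠ 0 then (PySem.Dict.empty : PySem.Dict Int Int).insert 2 c1 else PySem.Dict.empty))).getD 5 0 = 0 := by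
        split <;> split <;> simp [PySem.Dict.getD_insert]
      rw [dictstep _ 5 c3 g5]
      have g7 : ((if c3 ≠ 0 then (if c2 ≠ 0 then (if c1 ≠ 0 then (PySem.Dict.empty : PySem.Dict Int Int).insert 2 c1 else PySem.Dict.empty).insert 3 c2 else (if c1 ≠ 0 then (PySem.Dict.empty : PySem.Dict Int Int).insert 2 c1 else PySem.Dict.empty)).insert 5 c3 else (if c2 ≠ 0 then (if c1 ≠ 0 then (PySem.Dict.empty : PySem.Dict Int Int).insert 2 c1 else PySem.Dict.empty).insert 3 c2 else (if c1 ≠ 0 then (PySem.Dict.empty : PySem.Dict Int Int).insert 2 c1 else PySem.Dict.empty)))).getD 7 0 = 0 := by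
        split <;> split <;> try split
        all_goals simp [PySem.Dict.getD_insert]
      rw [dictstep _ 7 c4 g7]
      cases hb4 : (m4 == 1) <;> simp_all

-- ===== VERDICT (by name: the statement is the Claim_ definition above) =====
theorem factorize_7smooth_spec : Claim_equal_factorize_7smooth := by
  intro n _
  exact factorize_7smooth_spec_aux n
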